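-- pv_equiv track=rewrite | github.com/fikarm/dok-klaim-be | src/rag/dok_klaim/splitter.py | merge_single_lines
-- ===== SOURCE A (Python) =====
-- def merge_single_lines(chunks: list[str]) -> list[str]:
--     """
--     Menggabungkan chunk yang hanya satu baris menjadi satu chunk.
--     """
--     g = 0
--     groups = [""]
--     prev: str = ""
--     for chunk in chunks:
--         if len(prev.splitlines()) == 1:
--             # pass
--             groups[g] += "\n" + chunk
--         else:
--             # if len(chunk.splitlines()) == 1:
--             #     groups[g] += "\n" + chunk
--             # else:
--             #     groups.append(chunk)
--             groups.append(chunk)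
--             g += 1
--         prev = chunk
--
--     # hapus chunk pertama jika kosong
--     groups = groups[1:] if groups[0] == "" else groups
--
--     return groups
-- ===== SOURCE B (Python) =====
-- def merge_single_lines(chunks: list[str]) -> list[str]:
--     """
--     Menggabungkan chunk yang hanya satu baris menjadi satu chunk.
--     """
--     out = []  # groups in reverse order: the most recently started (leftmost) group is last
--     for c in reversed(chunks):
--         if out and len(c.splitlines()) == 1:
--             out[-1] = c + "\n" + out[-1]
--         else:
--             out.append(c)
--     out.reverse()
--     return out
-- ===== Notes on version B (the rewrite author's own statement) =====
-- stated objective: simpler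
-- what changed: B builds the groups by a single right-to-left pass that either merges the current chunk into the front group or starts a new one, instead of A's left-to-right pass with an index counter, an always-empty sentinel group and a final trim.
import Mathlib
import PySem

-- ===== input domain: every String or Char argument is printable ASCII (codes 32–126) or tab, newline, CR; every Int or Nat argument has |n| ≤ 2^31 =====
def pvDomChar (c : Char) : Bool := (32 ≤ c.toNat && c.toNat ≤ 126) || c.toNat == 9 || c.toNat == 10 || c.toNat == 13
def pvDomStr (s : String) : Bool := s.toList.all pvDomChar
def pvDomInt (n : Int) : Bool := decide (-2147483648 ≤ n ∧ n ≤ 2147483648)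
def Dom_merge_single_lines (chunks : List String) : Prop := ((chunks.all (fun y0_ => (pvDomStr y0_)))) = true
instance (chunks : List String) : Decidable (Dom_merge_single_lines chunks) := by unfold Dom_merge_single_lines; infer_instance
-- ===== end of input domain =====

-- B replaces A's left-to-right pass (index counter, empty sentinel group, final trim) by a
-- single right-to-left pass that merges each single-line chunk into the front group (simpler).

-- ===== PORT A =====
-- loop body of A: state is (groups, g, prev); g always indexes the last group, so set/getD are exact
def mslStepA (st : List String × Nat × String) (chunk : String) : List String × Nat × String :=
  let (groups, g, prev) := st
  if (PySem.Str.splitlines prev).length = 1 then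
    (groups.set g ((groups.getD g "") ++ ("\n" ++ chunk)), g, chunk)  -- groups[g] += "\n" + chunk
  else
    (groups ++ [chunk], g + 1, chunk)

def merge_single_lines (chunks : List String) : List String :=
  let st := chunks.foldl mslStepA ([""], 0, "")
  let groups := st.1
  -- groups[0] == "": groups is always nonempty, so getD 0 is exact; groups[1:] = drop 1
  if groups.getD 0 "" = "" then groups.drop 1 else groups

-- ===== PORT B =====
-- loop body of B: out[-1] read/write is exact here because it is guarded by out ≠ []
def mslStepB (out : List String) (c : String) : List String :=
  if out ≠ [] ∧ (PySem.Str.splitlines c).length = 1 then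
    out.set (out.length - 1) ((c ++ "\n") ++ out.getLastD "")  -- out[-1] = c + "\n" + out[-1]
  else
    out ++ [c]

def merge_single_lines_alt (chunks : List String) : List String :=
  let out := chunks.reverse.foldl mslStepB []   -- for c in reversed(chunks)
  out.reverse

-- ===== PRECONDITION & SPEC =====
def Spec_merge_single_lines (chunks : List String) (out : List String) : Prop := out = merge_single_lines_alt chunks
instance (chunks : List String) (out : List String) : Decidable (Spec_merge_single_lines chunks out) := by unfold Spec_merge_single_lines; infer_instance

-- ===== CLAIM (what is proved, stated in full; the proofs are below) =====
def Claim_equal_merge_single_lines : Prop := ∀ (chunks : List String), Dom_merge_single_lines chunks → Spec_merge_single_lines chunks (merge_single_lines chunks)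

-- ===== LEMMAS AND PROOFS =====

-- reference grouping: go acc prev rest, acc = current group so far, prev = last raw chunk added
def mslGo (acc prev : String) : List String → List String
  | [] => [acc]
  | c :: rest =>
    if (PySem.Str.splitlines prev).length = 1 then mslGo (acc ++ ("\n" ++ c)) c rest
    else acc :: mslGo c c rest

def mslG : List String → List String
  | [] => []
  | c :: rest => mslGo c c rest

theorem mslGo_ne_nil (rest : List String) : ∀ acc prev, mslGo acc prev rest ≠ [] := by
  induction rest with
  | nil => intro acc prev; simp [mslGo]
  | cons c rest ih =>
    intro acc prev
    simp only [mslGo]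
    split
    · exact ih _ _
    · simp

theorem mslG_ne_nil_iff (l : List String) : mslG l ≠ [] ↔ l ≠ [] := by
  cases l with
  | nil => simp [mslG]
  | cons c rest => simpa [mslG] using mslGo_ne_nil rest c c

theorem getD_append_last (l : List String) (a d : String) : (l ++ [a]).getD l.length d = a := by
  induction l with
  | nil => rfl
  | cons x xs ih => simpa using ih

theorem set_append_last (l : List String) (a x : String) : (l ++ [a]).set l.length x = l ++ [x] := by
  induction l with
  | nil => rfl
  | cons y ys ih => simpa using ih

-- A's loop invariant
theorem mslA_loop (rest : List String) : ∀ (pre : List String) (acc prev : String),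
    (rest.foldl mslStepA ("" :: pre ++ [acc], pre.length + 1, prev)).1
      = "" :: pre ++ mslGo acc prev rest := by
  induction rest with
  | nil => intro pre acc prev; simp [mslGo]
  | cons c rest ih =>
    intro pre acc prev
    simp only [List.foldl_cons, mslStepA, mslGo]
    split
    · have h1 : ("" :: pre ++ [acc]).getD (pre.length + 1) "" = acc :=
        getD_append_last ("" :: pre) acc ""
      have hset : ("" :: pre ++ [acc]).set (pre.length + 1)
          (("" :: pre ++ [acc]).getD (pre.length + 1) "" ++ ("\n" ++ c))
          = "" :: pre ++ [acc ++ ("\n" ++ c)] := by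
        rw [h1]; exact set_append_last ("" :: pre) acc (acc ++ ("\n" ++ c))
      rw [hset]
      exact ih pre (acc ++ ("\n" ++ c)) c
  -- else: the new group becomes the accumulator; re-associate pre ++ [acc]
    · have := ih (pre ++ [acc]) c c
      simp only [List.length_append, List.length_cons, List.length_nil] at this
      have harr : ("" :: pre ++ [acc]) ++ [c] = "" :: (pre ++ [acc]) ++ [c] := by simp
      rw [show pre.length + 1 + 1 = pre.length + 1 + 1 from rfl, harr]
      have : (rest.foldl mslStepA ("" :: (pre ++ [acc]) ++ [c], pre.length + 1 + 1, c)).1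
          = "" :: (pre ++ [acc]) ++ mslGo c c rest := by
        simpa [Nat.add_comm] using ih (pre ++ [acc]) c c
      rw [this]; simp

theorem splitlines_empty : (PySem.Str.splitlines "").length ≠ 1 := by decide

theorem mslA_eq (chunks : List String) :
    merge_single_lines chunks = mslG chunks := by
  cases chunks with
  | nil => simp [merge_single_lines, mslG]
  | cons c rest =>
    unfold merge_single_lines
    simp only [List.foldl_cons]
    have hstep : mslStepA ([""], 0, "") c = (["", c], 1, c) := by
      simp [mslStepA, splitlines_empty]
    rw [hstep]
    have := mslA_loop rest [] c c
    simp only [List.length_nil] at this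
    have h2 : (rest.foldl mslStepA (["", c], 1, c)).1 = "" :: mslGo c c rest := by
      simpa using this
    simp [h2, mslG]

theorem mslGo_via (rest : List String) : ∀ acc c,
    mslGo acc c rest =
      if (PySem.Str.splitlines c).length = 1 ∧ rest ≠ [] then
        (acc ++ ("\n" ++ (mslG rest).headI)) :: (mslG rest).tail
      else acc :: mslG rest := by
  induction rest with
  | nil => intro acc c; simp [mslGo, mslG]
  | cons d rs ih =>
    intro acc c
    by_cases hc : (PySem.Str.splitlines c).length = 1
    · simp only [mslGo, if_pos hc, ih (acc ++ ("\n" ++ d)) d]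
      have hG : mslG (d :: rs) = mslGo d d rs := rfl
      rw [hG, ih d d]
      by_cases hd : (PySem.Str.splitlines d).length = 1 ∧ rs ≠ []
      · simp only [if_pos hd, if_pos (And.intro hc (List.cons_ne_nil d rs))]
        simp [String.append_assoc]
      · simp only [if_neg hd, if_pos (And.intro hc (List.cons_ne_nil d rs))]
        simp
    · simp only [mslGo, if_neg hc]
      have : ¬ ((PySem.Str.splitlines c).length = 1 ∧ d :: rs ≠ []) := fun h => hc h.1
      rw [if_neg this]
      rfl

-- B's loop, written as the foldr that foldl-over-reverse is
theorem mslB_foldr (chunks : List String) :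
    chunks.foldr (fun c out => mslStepB out c) [] = (mslG chunks).reverse := by
  induction chunks with
  | nil => simp [mslG]
  | cons c rest ih =>
    simp only [List.foldr_cons, ih]
    cases hrest : rest with
    | nil => simp [mslStepB, mslG, mslGo]
    | cons d rs =>
      have hne : mslG (d :: rs) ≠ [] := (mslG_ne_nil_iff _).mpr (List.cons_ne_nil d rs)
      obtain ⟨x, xs, hxs⟩ := List.exists_cons_of_ne_nil hne
      by_cases hc : (PySem.Str.splitlines c).length = 1
      · -- merge the current chunk into the front group
        have hcond : (mslG (d :: rs)).reverse ≠ [] ∧ (PySem.Str.splitlines c).length = 1 := by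
          simp [hc, hne]
        rw [mslStepB, if_pos hcond, hxs]
        have hrev : (x :: xs).reverse = xs.reverse ++ [x] := by simp
        rw [hrev]
        have hlast : (xs.reverse ++ [x]).getLastD "" = x := by simp
        have hlen : (xs.reverse ++ [x]).length - 1 = xs.reverse.length := by simp
        rw [hlast, hlen, set_append_last]
        have hG : mslG (c :: d :: rs) = (c ++ ("\n" ++ x)) :: xs := by
          have h1 : mslG (c :: d :: rs) = mslGo c c (d :: rs) := rfl
          rw [h1, mslGo_via (d :: rs) c c,
            if_pos (And.intro hc (List.cons_ne_nil d rs)), hxs]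
          rfl
        rw [hG]
        simp [String.append_assoc]
      · have hcond : ¬ ((mslG (d :: rs)).reverse ≠ [] ∧ (PySem.Str.splitlines c).length = 1) := by
          simp [hc]
        rw [mslStepB, if_neg hcond]
        have hG : mslG (c :: d :: rs) = c :: mslG (d :: rs) := by
          have h1 : mslG (c :: d :: rs) = mslGo c c (d :: rs) := rfl
          rw [h1, mslGo_via (d :: rs) c c]
          simp [hc]
        rw [hG]
        simp

theorem mslB_eq (chunks : List String) :
    merge_single_lines_alt chunks = mslG chunks := by
  unfold merge_single_lines_alt
  rw [List.foldl_reverse]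
  rw [mslB_foldr]
  simp

-- ===== VERDICT (by name: the statement is the Claim_ definition above) =====
theorem merge_single_lines_spec : Claim_equal_merge_single_lines := by
  intro chunks _
  unfold Spec_merge_single_lines
  rw [mslA_eq, mslB_eq]
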